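-- pv_equiv track=rewrite | github.com/omriyakir21/UBDModel | orientationBasedPerformenceAnalysis.py | makeChainDict
-- ===== SOURCE A (Python) =====
-- def makeChainDict(chainNames):
--     chainDict = dict()
--     for chainName in chainNames:
--         receptorName = chainName.split('$')[0]
--         chainId = chainName.split('$')[1]
--         if receptorName in chainDict:
--             chainDict[receptorName].append(chainId)
--         else:
--             chainDict[receptorName] = []
--             chainDict[receptorName].append(chainId)
--     return chainDict
-- ===== SOURCE B (Python) =====
-- def makeChainDict(chainNames):
--     pairs = [(n.split('$')[0], n.split('$')[1]) for n in chainNames]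
--     receptors = list(dict.fromkeys(r for r, _ in pairs))
--     return {r: [c for rr, c in pairs if rr == r] for r in receptors}
-- ===== Notes on version B (the rewrite author's own statement) =====
-- stated objective: alternative
-- what changed: Replaces A's incremental insert-or-append dict loop with a comprehension pipeline: build (receptor, chainId) pairs once, dedup the receptors in first-occurrence order, and build each group by filtering the pairs.
import Mathlib
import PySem

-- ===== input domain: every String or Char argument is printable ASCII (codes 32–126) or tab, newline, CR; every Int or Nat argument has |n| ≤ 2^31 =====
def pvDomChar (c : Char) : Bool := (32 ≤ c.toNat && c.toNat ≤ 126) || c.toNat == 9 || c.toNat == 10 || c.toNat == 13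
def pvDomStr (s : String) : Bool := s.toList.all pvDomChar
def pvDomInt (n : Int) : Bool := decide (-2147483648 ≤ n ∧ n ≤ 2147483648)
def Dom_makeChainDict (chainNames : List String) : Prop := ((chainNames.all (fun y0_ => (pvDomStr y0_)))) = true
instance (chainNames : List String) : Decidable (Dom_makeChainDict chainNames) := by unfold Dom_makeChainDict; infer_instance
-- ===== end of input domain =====

-- B groups by a single map/dedup/filter comprehension pass instead of A's incremental insert-or-append dict loop (objective: alternative decomposition, same cost).
-- Both Pythons raise IndexError on a name without '$'; Pre_ excludes exactly those inputs.

-- ===== PORT A =====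
-- shared helper: n.split('$') (sep is the non-empty literal "$", so split? is always some)
def splitDollar (n : String) : List String := (PySem.Str.split? n "$").getD []

def makeChainDict (chainNames : List String) : List (String × List String) :=
  (chainNames.foldl (fun chainDict chainName =>
      let receptorName := PySem.List.pyGetD (splitDollar chainName) 0 ""
      let chainId := PySem.List.pyGetD (splitDollar chainName) 1 ""
      if chainDict.contains receptorName then
        chainDict.modify receptorName [] (· ++ [chainId])
      else
        (chainDict.insert receptorName []).modify receptorName [] (· ++ [chainId]))
    PySem.Dict.empty).items

-- ===== PORT B =====
def makeChainDict_alt (chainNames : List String) : List (String × List String) :=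
  let pairs := chainNames.map (fun n =>
    (PySem.List.pyGetD (splitDollar n) 0 "", PySem.List.pyGetD (splitDollar n) 1 ""))
  let receptors := PySem.List.dedup (pairs.map (·.1))
  receptors.map (fun r => (r, (pairs.filter (fun p => p.1 == r)).map (·.2)))

-- ===== PRECONDITION & SPEC =====
-- Pre_ excludes exactly the inputs where Python A raises IndexError: a chainName with no '$' (split gives a single piece).
def Pre_makeChainDict (chainNames : List String) : Prop :=
  ∀ n ∈ chainNames, '$' ∈ n.toList
instance (chainNames : List String) : Decidable (Pre_makeChainDict chainNames) := by unfold Pre_makeChainDict; infer_instance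

def pvWitness_makeChainDict : List String := ["r1$A", "r2$B", "r1$C"]

def Spec_makeChainDict (chainNames : List String) (out : List (String × List String)) : Prop := out = makeChainDict_alt chainNames
instance (chainNames : List String) (out : List (String × List String)) : Decidable (Spec_makeChainDict chainNames out) := by unfold Spec_makeChainDict; infer_instance

-- ===== CLAIM (what is proved, stated in full; the proofs are below) =====
def Claim_equal_makeChainDict : Prop := ∀ (chainNames : List String), Dom_makeChainDict chainNames → Pre_makeChainDict chainNames → Spec_makeChainDict chainNames (makeChainDict chainNames)

-- ===== LEMMAS AND PROOFS =====

-- A's loop body is, in both branches, a single modify-with-append.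
theorem stepA_eq_modify (d : PySem.Dict String (List String)) (r v : String) :
    (if d.contains r then d.modify r [] (· ++ [v])
     else (d.insert r []).modify r [] (· ++ [v])) = d.modify r [] (· ++ [v]) := by
  by_cases h : d.contains r = true
  · simp [h]
  · simp only [Bool.not_eq_true] at h
    simp only [h, if_neg Bool.false_ne_true]
    show (d.insert r []).insert r _ = d.insert r _
    rw [PySem.Dict.insert_insert_self, PySem.Dict.getD_insert_self]
    simp [pysem, h]

theorem set_update_nil_left {α : Type} [BEq α] (l : List α) :
    PySem.Set.update ([] : PySem.Set α) l = PySem.Set.ofList l := by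
  induction l with
  | nil => rfl
  | cons x xs ih => rfl

theorem makeChainDict_spec' (chainNames : List String) :
    makeChainDict chainNames = makeChainDict_alt chainNames := by
  unfold makeChainDict makeChainDict_alt
  simp only [stepA_eq_modify]
  set pairs : List (String × String) :=
    chainNames.map (fun n => (PySem.List.pyGetD (splitDollar n) 0 "", PySem.List.pyGetD (splitDollar n) 1 "")) with hp
  have hfold : chainNames.foldl
      (fun d n => d.modify (PySem.List.pyGetD (splitDollar n) 0 "") [] (· ++ [PySem.List.pyGetD (splitDollar n) 1 ""]))
      PySem.Dict.empty
      = pairs.foldl (fun d p => d.modify p.1 [] (· ++ [p.2])) PySem.Dict.empty := by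
    rw [hp, List.foldl_map]
  rw [hfold]
  set D := pairs.foldl (fun d p => d.modify p.1 [] (· ++ [p.2])) PySem.Dict.empty with hD
  have hkeys : D.keys = PySem.Set.ofList (pairs.map (·.1)) := by
    rw [hD, PySem.Dict.keys_foldl_modify_key pairs (·.1) [] (fun _ p v => v ++ [p.2]),
        PySem.Dict.keys_empty, set_update_nil_left]
  have hnd : D.keys.Nodup := by
    rw [hkeys]; exact PySem.Set.nodup_ofList _
  have hgetD : ∀ c, D.getD c [] = (pairs.filter (fun p => p.1 == c)).map (·.2) := by
    intro c
    rw [hD, PySem.Dict.getD_foldl_modify_append pairs PySem.Dict.empty c,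
        PySem.Dict.getD_empty, List.nil_append]
  rw [PySem.Dict.items_eq_map_keys D hnd [], hkeys, PySem.List.dedup_eq_ofList]
  exact List.map_congr_left (fun k _ => by rw [hgetD k])

-- ===== VERDICT (by name: the statement is the Claim_ definition above) =====
theorem makeChainDict_spec : Claim_equal_makeChainDict := by
  intro chainNames _ _
  show _ = _
  exact makeChainDict_spec' chainNames
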